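-- pv_equiv track=rewrite | github.com/david-siqi-liu/elements_of_programming_interviews | epi_judge_python/closest_int_same_weight.py | closest_int_same_bit_count
-- ===== SOURCE A (Python) =====
-- def closest_int_same_bit_count(x: int) -> int:
--     # Idea: swap the two rightmost consecutive bits that differ (i.e., 01 or 10)
--     for i in range(63):
--         j = i + 1
--         x_i = (x >> i) & 1
--         x_j = (x >> j) & 1
--
--         # If ith element and (i + 1)th element are different
--         if x_i != x_j:
--             bit_mask = (1 << i) | (1 << j)  # Bits at ith and (i + 1)th positions are both 1
--             x ^= bit_mask  # Set to complement, since x_i != x_j this is essentially swapping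
--             break
--
--     return x
-- ===== SOURCE B (Python) =====
-- def closest_int_same_bit_count(x: int) -> int:
--     # Branch-free bit trick: mm marks positions (< 63) where consecutive bits differ;
--     # isolate its lowest set bit and flip that bit pair.
--     mm = (x ^ (x >> 1)) & ((1 << 63) - 1)
--     if mm == 0:
--         return x
--     low = mm ^ (mm & (mm - 1))
--     return x ^ (low | (low << 1))
-- ===== Notes on version B (the rewrite author's own statement) =====
-- stated objective: alternative
-- what changed: Replaces the explicit bit-scanning loop with a branch-free closed-form bit computation: xor x with its own right shift to mark differing consecutive bit pairs, mask to the loop's scanned bit range, isolate the lowest set bit via n^(n&(n-1)), and flip the pair with one xor.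
import Mathlib
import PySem

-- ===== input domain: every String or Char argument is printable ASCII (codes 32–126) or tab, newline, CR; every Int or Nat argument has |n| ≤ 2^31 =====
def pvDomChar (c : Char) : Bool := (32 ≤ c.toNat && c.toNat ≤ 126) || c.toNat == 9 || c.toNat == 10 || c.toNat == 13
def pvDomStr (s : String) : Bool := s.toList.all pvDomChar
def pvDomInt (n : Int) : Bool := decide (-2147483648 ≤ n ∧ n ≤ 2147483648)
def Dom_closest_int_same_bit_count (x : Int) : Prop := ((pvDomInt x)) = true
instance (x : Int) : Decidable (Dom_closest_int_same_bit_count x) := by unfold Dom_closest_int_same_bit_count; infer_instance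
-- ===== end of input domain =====

-- B replaces A's explicit 63-step scanning loop by a closed-form bit computation
-- (mark differing consecutive bit pairs, isolate the lowest, flip the pair); objective: alternative.

-- ===== PORT A =====
-- the `for i in range(63): … break` loop of A, entered at index i
def closestLoop (x : Int) (i : Nat) : Int :=
  if i < 63 then
    let j := i + 1
    let x_i := Int.land (x >>> i) 1
    let x_j := Int.land (x >>> j) 1
    if x_i ≠ x_j then
      Int.xor x (Int.lor (1 <<< i) (1 <<< j))   -- x ^= (1 << i) | (1 << j); break
    else
      closestLoop x (i + 1)
  else x
termination_by 63 - i

def closest_int_same_bit_count (x : Int) : Int := closestLoop x 0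

-- ===== PORT B =====
def closest_int_same_bit_count_alt (x : Int) : Int :=
  let mm := Int.land (Int.xor x (x >>> (1 : Nat))) (((1 : Int) <<< (63 : Nat)) - 1)
  if mm = 0 then x
  else
    let low := Int.xor mm (Int.land mm (mm - 1))
    Int.xor x (Int.lor low (low <<< (1 : Nat)))

-- ===== PRECONDITION & SPEC =====
def Spec_closest_int_same_bit_count (x : Int) (out : Int) : Prop := out = closest_int_same_bit_count_alt x
instance (x : Int) (out : Int) : Decidable (Spec_closest_int_same_bit_count x out) := by unfold Spec_closest_int_same_bit_count; infer_instance

-- ===== CLAIM (what is proved, stated in full; the proofs are below) =====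
def Claim_equal_closest_int_same_bit_count : Prop := ∀ (x : Int), Dom_closest_int_same_bit_count x → Spec_closest_int_same_bit_count x (closest_int_same_bit_count x)

-- ===== LEMMAS AND PROOFS =====

-- baby testBit lemmas on ℕ
theorem tbE0 (a : Nat) : (2 * a).testBit 0 = false := by
  simp [Nat.testBit_zero]

theorem tbES (a j : Nat) : (2 * a).testBit (j + 1) = a.testBit j := by
  rw [Nat.testBit_succ]; congr 1; omega

theorem tbO0 (a : Nat) : (2 * a + 1).testBit 0 = true := by
  simp [Nat.testBit_zero]

theorem tbOS (a j : Nat) : (2 * a + 1).testBit (j + 1) = a.testBit j := by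
  rw [Nat.testBit_succ]; congr 1; omega

theorem and_eo (a b : Nat) : (2 * a) &&& (2 * b + 1) = 2 * (a &&& b) := by
  apply Nat.eq_of_testBit_eq; intro i
  cases i with
  | zero => simp
  | succ j => simp [tbES, tbOS]

theorem and_oe (a b : Nat) : (2 * a + 1) &&& (2 * b) = 2 * (a &&& b) := by
  apply Nat.eq_of_testBit_eq; intro i
  cases i with
  | zero => simp
  | succ j => simp [tbES, tbOS]

theorem xor_ee (a b : Nat) : (2 * a) ^^^ (2 * b) = 2 * (a ^^^ b) := by
  apply Nat.eq_of_testBit_eq; intro i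
  cases i with
  | zero => simp
  | succ j => simp [tbES]

theorem xor_oe (a b : Nat) : (2 * a + 1) ^^^ (2 * b) = 2 * (a ^^^ b) + 1 := by
  apply Nat.eq_of_testBit_eq; intro i
  cases i with
  | zero => simp
  | succ j => simp [tbES, tbOS]

-- the lowest-set-bit identity: n ^ (n & (n-1)) isolates the lowest set bit
theorem lowbit_spec : ∀ n : Nat, n ≠ 0 →
    ∃ k, n.testBit k = true ∧ (∀ j, j < k → n.testBit j = false) ∧
      n ^^^ (n &&& (n - 1)) = 2 ^ k := by
  intro n
  induction n using Nat.strong_induction_on with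
  | _ n ih =>
    intro hn
    rcases Nat.even_or_odd n with ⟨r, hr⟩ | ⟨r, hr⟩
    · -- n = 2r, r ≠ 0
      have hr2 : n = 2 * r := by omega
      have hrne : r ≠ 0 := by omega
      obtain ⟨k, htk, hlt, heq⟩ := ih r (by omega) hrne
      refine ⟨k + 1, ?_, ?_, ?_⟩
      · rw [hr2, tbES]; exact htk
      · intro j hj
        cases j with
        | zero => rw [hr2]; exact tbE0 r
        | succ j' => rw [hr2, tbES]; exact hlt j' (by omega)
      · rw [hr2, show 2 * r - 1 = 2 * (r - 1) + 1 by omega, and_eo, xor_ee, heq]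
        ring
    · -- n = 2r + 1
      refine ⟨0, ?_, by omega, ?_⟩
      · rw [hr, tbO0]
      · rw [hr, show 2 * r + 1 - 1 = 2 * r by omega, and_oe, Nat.and_self, xor_oe, Nat.xor_self]
        decide

theorem int_testBit_shiftRight (x : Int) (i j : Nat) :
    (x >>> i).testBit j = x.testBit (i + j) := by
  cases x with
  | ofNat m =>
    show (Int.ofNat (m >>> i)).testBit j = _
    simp [Int.testBit, Nat.testBit_shiftRight]
  | negSucc m =>
    show (Int.negSucc (m >>> i)).testBit j = _
    simp [Int.testBit, Nat.testBit_shiftRight]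

theorem one_testBit_succ (j : Nat) : (1 : Nat).testBit (j + 1) = false := by
  rw [Nat.testBit_succ]
  simp

theorem ldiff_one (m : Nat) : Nat.ldiff 1 m = if m % 2 = 1 then 0 else 1 := by
  apply Nat.eq_of_testBit_eq; intro i
  rcases Nat.mod_two_eq_zero_or_one m with h | h
  · rw [if_neg (by omega)]
    cases i with
    | zero => rw [Nat.testBit_ldiff, Nat.testBit_zero m, h]; rfl
    | succ j => simp [Nat.testBit_ldiff, one_testBit_succ]
  · rw [if_pos h]
    cases i with
    | zero => rw [Nat.testBit_ldiff, Nat.testBit_zero m, h]; rfl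
    | succ j => simp [Nat.testBit_ldiff, one_testBit_succ, Nat.zero_testBit]

theorem land_one (y : Int) : Int.land y 1 = if y.testBit 0 then 1 else 0 := by
  cases y with
  | ofNat m =>
    show Int.ofNat (m &&& 1) = _
    rw [Nat.and_one_is_mod]
    rcases Nat.mod_two_eq_zero_or_one m with h | h <;>
      simp [Int.testBit, Nat.testBit_zero, h]
  | negSucc m =>
    show Int.ofNat (Nat.ldiff 1 m) = _
    rw [ldiff_one]
    rcases Nat.mod_two_eq_zero_or_one m with h | h <;>
      simp [Int.testBit, Nat.testBit_zero, h]

theorem bitval (x : Int) (i : Nat) :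
    Int.land (x >>> i) 1 = if x.testBit i then 1 else 0 := by
  rw [land_one, int_testBit_shiftRight]
  simp

-- the loop's branch condition in terms of testBit
theorem branch_iff (x : Int) (i : Nat) :
    (Int.land (x >>> i) 1 ≠ Int.land (x >>> (i + 1)) 1) ↔ x.testBit i ≠ x.testBit (i + 1) := by
  rw [bitval, bitval]
  cases h1 : x.testBit i <;> cases h2 : x.testBit (i + 1) <;> simp

theorem loop_none (x : Int) : ∀ d i, i + d = 63 →
    (∀ k, i ≤ k → k < 63 → x.testBit k = x.testBit (k + 1)) →
    closestLoop x i = x := by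
  intro d
  induction d with
  | zero => intro i hi _; rw [closestLoop]; simp [show ¬ i < 63 by omega]
  | succ d ihd =>
    intro i hi hk
    rw [closestLoop]
    simp only [show i < 63 by omega, if_true]
    have hb : ¬ (Int.land (x >>> i) 1 ≠ Int.land (x >>> (i + 1)) 1) := by
      rw [branch_iff]; simp [hk i (le_refl i) (by omega)]
    simp only [hb, if_false]
    exact ihd (i + 1) (by omega) (fun k h1 h2 => hk k (by omega) h2)

theorem loop_some (x : Int) (k : Nat) (hk : k < 63)
    (hd : x.testBit k ≠ x.testBit (k + 1)) : ∀ d i, i + d = k →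
    (∀ j, i ≤ j → j < k → x.testBit j = x.testBit (j + 1)) →
    closestLoop x i = Int.xor x (Int.lor (1 <<< k) (1 <<< (k + 1))) := by
  intro d
  induction d with
  | zero =>
    intro i hi _
    have : i = k := by omega
    subst this
    rw [closestLoop]
    simp only [show i < 63 by omega, if_true]
    have hb : (Int.land (x >>> i) 1 ≠ Int.land (x >>> (i + 1)) 1) := (branch_iff x i).mpr hd
    simp [hb]
  | succ d ihd =>
    intro i hi hj
    rw [closestLoop]
    simp only [show i < 63 by omega, if_true]
    have hb : ¬ (Int.land (x >>> i) 1 ≠ Int.land (x >>> (i + 1)) 1) := by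
      rw [branch_iff]; simp [hj i (le_refl i) (by omega)]
    simp only [hb, if_false]
    exact ihd (i + 1) (by omega) (fun j h1 h2 => hj j (by omega) h2)

-- the mask (1 <<< 63) - 1 as a natural number
theorem mask_eq : ((1 : Int) <<< (63 : Nat)) - 1 = Int.ofNat (2 ^ 63 - 1) := by decide

-- B's masked value is a natural number with the 'consecutive bits differ' bits
theorem mm_spec (x : Int) : ∃ n : Nat,
    Int.land (Int.xor x (x >>> (1 : Nat))) (((1 : Int) <<< (63 : Nat)) - 1) = Int.ofNat n ∧
    ∀ k, n.testBit k = (decide (k < 63) && (x.testBit k ^^ x.testBit (k + 1))) := by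
  rw [mask_eq]
  have hoext : ∀ (m : Int), ∃ n : Nat, Int.land m (Int.ofNat (2 ^ 63 - 1)) = Int.ofNat n := by
    intro m; cases m with
    | ofNat a => exact ⟨_, rfl⟩
    | negSucc a => exact ⟨_, rfl⟩
  obtain ⟨n, hn⟩ := hoext (Int.xor x (x >>> (1 : Nat)))
  refine ⟨n, hn, fun k => ?_⟩
  have h1 : (Int.ofNat n).testBit k = n.testBit k := rfl
  rw [← h1, ← hn, Int.testBit_land, Int.testBit_lxor, int_testBit_shiftRight]
  have h2 : (Int.ofNat (2 ^ 63 - 1)).testBit k = decide (k < 63) := by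
    show (2 ^ 63 - 1 : Nat).testBit k = _
    exact Nat.testBit_two_pow_sub_one 63 k
  rw [h2, Nat.add_comm 1 k, Bool.and_comm]

-- main equivalence, no Dom restriction needed
theorem main_eq (x : Int) : closestLoop x 0 = closest_int_same_bit_count_alt x := by
  obtain ⟨n, hn, hbits⟩ := mm_spec x
  unfold closest_int_same_bit_count_alt
  simp only [hn]
  by_cases h0 : n = 0
  · subst h0
    rw [if_pos (show Int.ofNat 0 = 0 from rfl)]
    apply loop_none x 63 0 rfl
    intro k _ hk63
    have := hbits k
    simp [Nat.zero_testBit, hk63] at this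
    cases h1 : x.testBit k <;> cases h2 : x.testBit (k + 1) <;>
      simp [h1, h2] at this ⊢
  · obtain ⟨k, htk, hlt, heq⟩ := lowbit_spec n h0
    have hk := hbits k
    rw [htk] at hk
    have hk63 : k < 63 := by
      by_contra hc
      simp [hc] at hk
    have hdiff : x.testBit k ≠ x.testBit (k + 1) := by
      simp [hk63] at hk
      cases h1 : x.testBit k <;> cases h2 : x.testBit (k + 1) <;>
        simp [h1, h2] at hk ⊢
    have hne : Int.ofNat n ≠ 0 := by
      simp [Int.ofNat_eq_natCast]
      omega
    simp only [hne, if_false]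
    -- A's side
    rw [loop_some x k hk63 hdiff k 0 (by omega) ?_]
    · -- values agree
      have hsub : (Int.ofNat n) - 1 = Int.ofNat (n - 1) := by
        simp only [Int.ofNat_eq_natCast]
        omega
      rw [hsub]
      have hland : Int.land (Int.ofNat n) (Int.ofNat (n - 1)) = Int.ofNat (n &&& (n - 1)) := rfl
      have hxor : Int.xor (Int.ofNat n) (Int.ofNat (n &&& (n - 1))) = Int.ofNat (n ^^^ (n &&& (n - 1))) := rfl
      rw [hland, hxor, heq]
      have hshl : (Int.ofNat (2 ^ k)) <<< (1 : Nat) = Int.ofNat ((2 ^ k) <<< 1) := rfl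
      have h2k : (2 ^ k) <<< 1 = 2 ^ (k + 1) := by
        rw [Nat.shiftLeft_eq]; ring
      rw [hshl, h2k]
      simp [Nat.shiftLeft_eq, Int.ofNat_eq_natCast]
    · -- no earlier differing pair
      intro j _ hjk
      have hj := hbits j
      rw [hlt j hjk] at hj
      simp [show j < 63 by omega] at hj
      cases h1 : x.testBit j <;> cases h2 : x.testBit (j + 1) <;>
        simp [h1, h2] at hj ⊢

-- ===== VERDICT (by name: the statement is the Claim_ definition above) =====
theorem closest_int_same_bit_count_spec : Claim_equal_closest_int_same_bit_count := by
  intro x _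
  show closestLoop x 0 = _
  exact main_eq x
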